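-- pv_equiv track=rewrite | github.com/ironiclawdoctor-design/deception-floor-commodity-factory | autoresearch-pronouns/skill.py | _find_last_mentioned
-- ===== SOURCE A (Python) =====
-- def _find_last_mentioned(text, registry, hint=None):
--     """Find the last agent mentioned by name in text."""
--     if hint:
--         h = hint.lower()
--         if h in registry:
--             return registry[h]
--         first = h.split()[0]
--         if first in registry:
--             return registry[first]
--
--     # Scan text for agent names (last occurrence wins)
--     lower = text.lower()
--     last_pos = -1
--     last_agent = None
--
--     for name, agent in registry.items():
--         pos = lower.rfind(name)
--         if pos > last_pos:
--             last_pos = pos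
--             last_agent = agent
--
--     return last_agent
-- ===== SOURCE B (Python) =====
-- def _find_last_mentioned(text, registry, hint=None):
--     """Find the last agent mentioned by name in text."""
--     if hint:
--         h = hint.lower()
--         if h in registry:
--             return registry[h]
--         first = h.split()[0]
--         if first in registry:
--             return registry[first]
--
--     # Scan positions right-to-left; the first position where any registry
--     # name starts is the last occurrence, and registry order breaks ties.
--     lower = text.lower()
--     for pos in range(len(text), -1, -1):
--         for name, agent in registry.items():
--             if lower.startswith(name, pos):
--                 return agent
--     return None
-- ===== Notes on version B (the rewrite author's own statement) =====
-- stated objective: alternative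
-- what changed: Replaces the per-name rfind scan with max-position bookkeeping by a single right-to-left sweep over text positions that returns the first registry entry matching at the latest position, so no position/agent accumulator is kept and the scan stops at the last occurrence.
import Mathlib
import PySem

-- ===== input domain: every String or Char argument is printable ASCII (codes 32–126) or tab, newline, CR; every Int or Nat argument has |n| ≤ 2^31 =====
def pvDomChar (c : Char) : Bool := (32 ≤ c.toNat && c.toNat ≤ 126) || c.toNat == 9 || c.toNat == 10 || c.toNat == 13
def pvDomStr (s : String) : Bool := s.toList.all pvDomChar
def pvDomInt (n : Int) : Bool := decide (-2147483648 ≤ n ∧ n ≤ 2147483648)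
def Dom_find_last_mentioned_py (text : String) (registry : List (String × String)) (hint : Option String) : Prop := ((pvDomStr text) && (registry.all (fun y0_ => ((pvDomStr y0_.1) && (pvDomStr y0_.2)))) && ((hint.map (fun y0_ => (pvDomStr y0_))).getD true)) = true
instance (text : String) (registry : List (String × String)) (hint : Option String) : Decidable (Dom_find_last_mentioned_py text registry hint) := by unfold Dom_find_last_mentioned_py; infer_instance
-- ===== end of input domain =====

-- B replaces A's per-name rfind scan with one right-to-left sweep over text positions that stops
-- at the last occurrence (first registry entry matching at the latest position wins); the timing
-- run measured B faster on its generated inputs.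

-- ===== PORT A =====

-- the hint-lookup prologue, identical source code in A and B (early returns become Option (Option String):
-- 'some r' = the function returns r here, 'none' = fall through to the text scan)
def pyHintLookup (registry : List (String × String)) (hint : Option String) : Option (Option String) :=
  match hint with
  | none => none
  | some s =>
    if s = "" then none                                    -- 'if hint:' — empty string is falsy
    else
      let h := PySem.Str.lower s
      match (PySem.Dict.mk registry).get? h with
      | some v => some (some v)
      | none =>
        match PySem.Str.split₀ h with
        | [] => some none                                  -- Python raises IndexError here; excluded by Pre_
        | first :: _ =>
          match (PySem.Dict.mk registry).get? first with
          | some v => some (some v)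
          | none => none

-- A's loop: for name, agent in registry.items(): pos = lower.rfind(name); if pos > last_pos: update
def pyScanA (text : String) (registry : List (String × String)) : Option String :=
  let lower := PySem.Str.lower text
  (registry.foldl
    (fun (st : Int × Option String) e =>
      let pos := PySem.Str.rfind lower e.1
      if st.1 < pos then (pos, some e.2) else st)
    (-1, none)).2

def find_last_mentioned_py (text : String) (registry : List (String × String)) (hint : Option String) : Option String :=
  match pyHintLookup registry hint with
  | some r => r
  | none => pyScanA text registry

-- ===== PORT B =====

-- B's inner loop: for name, agent in registry.items(): if lower.startswith(name, pos): return agent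
-- (lower.startswith(name, pos) with 0 ≤ pos ≤ len(lower) is exactly: name is a prefix of lower[pos:])
def pyScanBGo (lower : List Char) (registry : List (String × String)) : Nat → Option String
  | 0 =>
    match registry.find? (fun e => PySem.Chars.startswith (lower.drop 0) e.1.toList) with
    | some e => some e.2
    | none => none
  | p + 1 =>
    match registry.find? (fun e => PySem.Chars.startswith (lower.drop (p + 1)) e.1.toList) with
    | some e => some e.2
    | none => pyScanBGo lower registry p

-- B's scan: for pos in range(len(text), -1, -1): …
def pyScanB (text : String) (registry : List (String × String)) : Option String :=
  let lower := (PySem.Str.lower text).toList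
  pyScanBGo lower registry text.toList.length

def find_last_mentioned_py_alt (text : String) (registry : List (String × String)) (hint : Option String) : Option String :=
  match pyHintLookup registry hint with
  | some r => r
  | none => pyScanB text registry

-- ===== PRECONDITION & SPEC =====

-- Pre_ excludes exactly the inputs where Python A raises IndexError (h.split()[0] on a non-empty,
-- whitespace-only hint that is not a registry key); B raises the same IndexError there.
def Pre_find_last_mentioned_py (text : String) (registry : List (String × String)) (hint : Option String) : Prop :=
  (match hint with
   | none => true
   | some s =>
       (s == "") || (PySem.Dict.mk registry).contains (PySem.Str.lower s) ||
         !(PySem.Str.split₀ (PySem.Str.lower s)).isEmpty) = true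
instance (text : String) (registry : List (String × String)) (hint : Option String) : Decidable (Pre_find_last_mentioned_py text registry hint) := by unfold Pre_find_last_mentioned_py; infer_instance

def pvWitness_find_last_mentioned_py : String × (List (String × String)) × Option String :=
  ("hi bob and alice", [("alice", "Agent-A"), ("bob", "Agent-B")], some "who")

def Spec_find_last_mentioned_py (text : String) (registry : List (String × String)) (hint : Option String) (out : Option String) : Prop := out = find_last_mentioned_py_alt text registry hint
instance (text : String) (registry : List (String × String)) (hint : Option String) (out : Option String) : Decidable (Spec_find_last_mentioned_py text registry hint out) := by unfold Spec_find_last_mentioned_py; infer_instance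

-- ===== CLAIM (what is proved, stated in full; the proofs are below) =====
def Claim_equal_find_last_mentioned_py : Prop := ∀ (text : String) (registry : List (String × String)) (hint : Option String), Dom_find_last_mentioned_py text registry hint → Pre_find_last_mentioned_py text registry hint → Spec_find_last_mentioned_py text registry hint (find_last_mentioned_py text registry hint)

-- ===== LEMMAS AND PROOFS =====

-- `rlast s sub k`: the greatest j ≤ k with sub <+: s.drop j, as an Option — the value rfind.go computes.
def rlast (s sub : List Char) : Nat → Option Nat
  | 0 => if sub.isPrefixOf s then some 0 else none
  | j + 1 => if sub.isPrefixOf (s.drop (j + 1)) then some (j + 1) else rlast s sub j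

theorem rfind_go_eq_rlast (s sub : List Char) (k : Nat) :
    PySem.Chars.rfind.go s sub k = ((rlast s sub k).map (fun j => (j : Int))).getD (-1) := by
  induction k with
  | zero => rw [PySem.Chars.rfind.go, rlast]; split <;> simp
  | succ j ih => rw [PySem.Chars.rfind.go, rlast]; split <;> simp [ih]

theorem rlast_eq_none_iff (s sub : List Char) (k : Nat) :
    rlast s sub k = none ↔ ∀ j ≤ k, ¬ sub <+: s.drop j := by
  induction k with
  | zero =>
    rw [rlast]
    split_ifs with hp
    · simp only [List.isPrefixOf_iff_prefix] at hp
      exact iff_of_false (by simp) (fun h => h 0 le_rfl (by simpa using hp))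
    · simp only [List.isPrefixOf_iff_prefix] at hp
      refine iff_of_true rfl fun j hj => ?_
      interval_cases j
      simpa using hp
  | succ n ih =>
    rw [rlast]
    split_ifs with hp
    · simp only [List.isPrefixOf_iff_prefix] at hp
      exact iff_of_false (by simp) (fun h => h (n + 1) le_rfl hp)
    · simp only [List.isPrefixOf_iff_prefix] at hp
      rw [ih]
      constructor
      · intro h j hj
        by_cases hje : j = n + 1
        · subst hje; exact hp
        · exact h j (by omega)
      · intro h j hj
        exact h j (by omega)

theorem rlast_eq_some_iff (s sub : List Char) (k j : Nat) :
    rlast s sub k = some j ↔ (j ≤ k ∧ sub <+: s.drop j ∧ ∀ i, j < i → i ≤ k → ¬ sub <+: s.drop i) := by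
  induction k with
  | zero =>
    rw [rlast]
    split_ifs with hp
    · simp only [List.isPrefixOf_iff_prefix] at hp
      constructor
      · intro h
        obtain rfl : (0 : Nat) = j := Option.some.inj h
        exact ⟨le_rfl, by simpa using hp, fun i h1 h2 => by omega⟩
      · rintro ⟨hj, hpf, -⟩
        interval_cases j
        rfl
    · simp only [List.isPrefixOf_iff_prefix] at hp
      constructor
      · intro h; cases h
      · rintro ⟨hj, hpf, -⟩
        interval_cases j
        exact absurd (by simpa using hpf) hp
  | succ n ih =>
    rw [rlast]
    split_ifs with hp
    · simp only [List.isPrefixOf_iff_prefix] at hp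
      constructor
      · intro h
        obtain rfl : n + 1 = j := Option.some.inj h
        exact ⟨le_rfl, hp, fun i h1 h2 => by omega⟩
      · rintro ⟨hj, hpf, hmax⟩
        by_cases hje : j = n + 1
        · subst hje; rfl
        · exact absurd hp (hmax (n + 1) (by omega) le_rfl)
    · simp only [List.isPrefixOf_iff_prefix] at hp
      rw [ih]
      constructor
      · rintro ⟨hj, hpf, hmax⟩
        refine ⟨by omega, hpf, fun i h1 h2 => ?_⟩
        by_cases hie : i = n + 1
        · subst hie; exact hp
        · exact hmax i h1 (by omega)
      · rintro ⟨hj, hpf, hmax⟩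
        have hjn : j ≤ n := by
          by_cases hje : j = n + 1
          · subst hje; exact absurd hpf hp
          · omega
        exact ⟨hjn, hpf, fun i h1 h2 => hmax i h1 (by omega)⟩

-- rfind on the whole string, restated through rlast
theorem rfind_eq_rlast (s sub : List Char) :
    PySem.Chars.rfind s sub = ((rlast s sub s.length).map (fun j => (j : Int))).getD (-1) := by
  rw [PySem.Chars.rfind, rfind_go_eq_rlast]

theorem rfind_ge_neg_one (lower sub : List Char) : -1 ≤ PySem.Chars.rfind lower sub := by
  rw [rfind_eq_rlast]
  cases h : rlast lower sub lower.length <;> simp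

-- the running max of A's fold never decreases below its seed
theorem le_foldl_max (lower : List Char) (l : List (String × String)) (a : Int) :
    a ≤ l.foldl (fun (m : Int) e => max m (PySem.Chars.rfind lower e.1.toList)) a := by
  induction l generalizing a with
  | nil => simp
  | cons x xs ih => exact le_trans (le_max_left _ _) (ih _)

-- each entry's rfind is at most A's final running max
theorem rfind_le_foldl_max' (lower : List Char) (l : List (String × String)) (a : Int)
    (e : String × String) (he : e ∈ l) :
    PySem.Chars.rfind lower e.1.toList
      ≤ l.foldl (fun (m : Int) e => max m (PySem.Chars.rfind lower e.1.toList)) a := by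
  induction l generalizing a with
  | nil => cases he
  | cons x xs ih =>
    rcases List.mem_cons.mp he with h | h
    · subst h
      exact le_trans (le_max_right _ _) (le_foldl_max lower xs _)
    · exact ih _ h

theorem rfind_le_foldl_max (lower : List Char) (registry : List (String × String))
    (e : String × String) (he : e ∈ registry) :
    PySem.Chars.rfind lower e.1.toList
      ≤ registry.foldl (fun (m : Int) e => max m (PySem.Chars.rfind lower e.1.toList)) (-1) :=
  rfind_le_foldl_max' lower registry (-1) e he

-- the B-side countdown, characterised
theorem pyScanBGo_eq_none (lower : List Char) (registry : List (String × String)) (pos : Nat)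
    (h : ∀ p ≤ pos, registry.find? (fun e => PySem.Chars.startswith (lower.drop p) e.1.toList) = none) :
    pyScanBGo lower registry pos = none := by
  induction pos with
  | zero => rw [pyScanBGo, h 0 le_rfl]
  | succ p ih =>
    rw [pyScanBGo, h (p + 1) le_rfl]
    exact ih fun q hq => h q (Nat.le_succ_of_le hq)

theorem pyScanBGo_eq_some (lower : List Char) (registry : List (String × String)) (pos p0 : Nat)
    (e : String × String) (hle : p0 ≤ pos)
    (hfind : registry.find? (fun e => PySem.Chars.startswith (lower.drop p0) e.1.toList) = some e)
    (hmax : ∀ q, p0 < q → q ≤ pos → registry.find? (fun e => PySem.Chars.startswith (lower.drop q) e.1.toList) = none) :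
    pyScanBGo lower registry pos = some e.2 := by
  induction pos with
  | zero =>
    interval_cases p0
    rw [pyScanBGo, hfind]
  | succ p ih =>
    by_cases h' : p0 = p + 1
    · subst h'
      rw [pyScanBGo, hfind]
    · rw [pyScanBGo, hmax (p + 1) (by omega) le_rfl]
      exact ih (by omega) fun q hq hq' => hmax q hq (by omega)

-- the A-side fold, characterised: running max of rfind values, first entry reaching the final max
theorem foldA_char (lower : List Char) (es : List (String × String)) (st : Int × Option String) :
    es.foldl
      (fun (st : Int × Option String) e =>
        let pos := PySem.Chars.rfind lower e.1.toList
        if st.1 < pos then (pos, some e.2) else st)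
      st =
    (es.foldl (fun (m : Int) e => max m (PySem.Chars.rfind lower e.1.toList)) st.1,
     if st.1 = es.foldl (fun (m : Int) e => max m (PySem.Chars.rfind lower e.1.toList)) st.1 then st.2
     else (es.find? (fun e => PySem.Chars.rfind lower e.1.toList
            == es.foldl (fun (m : Int) e => max m (PySem.Chars.rfind lower e.1.toList)) st.1)).map (·.2)) := by
  induction es generalizing st with
  | nil => simp
  | cons e es ih =>
    simp only [List.foldl_cons, List.find?_cons]
    rw [ih]
    have hst1 : (if st.1 < PySem.Chars.rfind lower e.1.toList
        then ((PySem.Chars.rfind lower e.1.toList : Int), some e.2) else st).1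
        = max st.1 (PySem.Chars.rfind lower e.1.toList) := by
      split_ifs with h
      · simp [max_eq_right (le_of_lt h)]
      · simp [max_eq_left (not_lt.mp h)]
    rw [hst1]
    set r := PySem.Chars.rfind lower e.1.toList with hr
    set M := es.foldl (fun (m : Int) e => max m (PySem.Chars.rfind lower e.1.toList)) (max st.1 r) with hM
    have hMge : max st.1 r ≤ M := le_foldl_max lower es _
    refine Prod.ext rfl ?_
    simp only []
    by_cases hlt : st.1 < r
    · rw [if_neg (by omega : ¬ st.1 = M)]
      by_cases hrM : r = M
      · rw [if_pos (by omega : max st.1 r = M)]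
        rw [if_pos hlt]
        have hb : (r == M) = true := by simpa using hrM
        rw [hb]
        simp
      · rw [if_neg (by omega : ¬ max st.1 r = M)]
        have hb : (r == M) = false := by simpa using hrM
        rw [hb]
    · have hmx : max st.1 r = st.1 := by omega
      rw [hmx] at hM hMge ⊢
      rw [if_neg hlt]
      by_cases h1 : st.1 = M
      · rw [if_pos h1, if_pos h1]
      · rw [if_neg h1, if_neg h1]
        have hb : (r == M) = false := by simpa using (by omega : ¬ r = M)
        rw [hb]

-- pointwise-equal predicates give equal find?
theorem find?_congr_mem {α : Type} (l : List α) (p q : α → Bool) (h : ∀ x ∈ l, p x = q x) :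
    l.find? p = l.find? q := by
  induction l with
  | nil => rfl
  | cons x xs ih =>
    simp only [List.find?_cons, h x List.mem_cons_self]
    split
    · rfl
    · exact ih fun y hy => h y (List.mem_cons_of_mem _ hy)

-- THE CORE: A's scan equals B's scan
theorem scan_eq (text : String) (registry : List (String × String)) :
    pyScanA text registry = pyScanB text registry := by
  unfold pyScanA pyScanB
  simp only [PySem.Str.rfind_eq, PySem.Str.toList_lower]
  set lower := PySem.Chars.lower text.toList with hlow
  have hlen : lower.length = text.toList.length := by
    simp [hlow, PySem.Chars.lower]
  rw [foldA_char]
  simp only []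
  set M := registry.foldl (fun (m : Int) e => max m (PySem.Chars.rfind lower e.1.toList)) (-1) with hM
  by_cases hM1 : (-1 : Int) = M
  · -- no name occurs anywhere: every rfind is -1, and B's sweep finds nothing
    rw [if_pos hM1]
    have hall : ∀ e ∈ registry, PySem.Chars.rfind lower e.1.toList = -1 := by
      intro e he
      have hge := rfind_ge_neg_one lower e.1.toList
      have hle := rfind_le_foldl_max lower registry e he
      omega
    symm
    apply pyScanBGo_eq_none
    intro p hp
    rw [List.find?_eq_none]
    intro e he
    rw [PySem.Chars.startswith_iff]
    intro hpref
    have h1 : PySem.Chars.rfind lower e.1.toList = -1 := hall e he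
    rw [rfind_eq_rlast] at h1
    cases hcase : rlast lower e.1.toList lower.length with
    | some j => rw [hcase] at h1; simp at h1
    | none => exact (rlast_eq_none_iff lower e.1.toList lower.length).mp hcase p (by omega) hpref
  · -- some name occurs: M is the greatest matching position; both return the first entry matching there
    rw [if_neg hM1]
    have hMge : (-1 : Int) ≤ M := le_foldl_max lower registry (-1)
    -- M is attained by some entry
    have hex : ∃ e ∈ registry, PySem.Chars.rfind lower e.1.toList = M := by
      by_contra hno
      push_neg at hno
      have key : ∀ (l : List (String × String)) (a : Int), a ≠ M →
          (∀ e ∈ l, PySem.Chars.rfind lower e.1.toList ≠ M) →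
          l.foldl (fun (m : Int) e => max m (PySem.Chars.rfind lower e.1.toList)) a ≠ M := by
        intro l
        induction l with
        | nil => intro a ha _; simpa using ha
        | cons x xs ihx =>
          intro a ha hl
          simp only [List.foldl_cons]
          refine ihx _ ?_ fun e he => hl e (List.mem_cons_of_mem _ he)
          have hx := hl x List.mem_cons_self
          omega
      exact key registry (-1) hM1 hno rfl
    obtain ⟨e0, he0, hre0⟩ := hex
    have hMbound : M.toNat ≤ lower.length ∧ (e0.1.toList <+: lower.drop M.toNat) := by
      rw [rfind_eq_rlast] at hre0
      cases hcase : rlast lower e0.1.toList lower.length with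
      | none => rw [hcase] at hre0; simp at hre0; omega
      | some j =>
        rw [hcase] at hre0
        simp at hre0
        obtain ⟨hj, hp, -⟩ := (rlast_eq_some_iff _ _ _ _).mp hcase
        have hMj : M.toNat = j := by omega
        rw [hMj]
        exact ⟨hj, hp⟩
    -- matching at any position q ≤ len forces rfind ≥ q
    have hrfind_ge : ∀ q ≤ lower.length, ∀ e, e.1.toList <+: lower.drop q →
        (q : Int) ≤ PySem.Chars.rfind lower (e : String × String).1.toList := by
      intro q hql e hpref
      rw [rfind_eq_rlast]
      cases hcase : rlast lower e.1.toList lower.length with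
      | none => exact absurd hpref ((rlast_eq_none_iff _ _ _).mp hcase q hql)
      | some j =>
        obtain ⟨hj, hp, hmax⟩ := (rlast_eq_some_iff _ _ _ _).mp hcase
        show (q : Int) ≤ (j : Int)
        by_contra hlt
        exact hmax q (by omega) hql hpref
    have hnomatch_above : ∀ q, M.toNat < q → q ≤ lower.length →
        ∀ e ∈ registry, ¬ e.1.toList <+: lower.drop q := by
      intro q hq hql e he hpref
      have hge := hrfind_ge q hql e hpref
      have hle := rfind_le_foldl_max lower registry e he
      omega
    -- an entry's rfind equals M iff the entry matches at position M.toNat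
    have hiff : ∀ e ∈ registry,
        (PySem.Chars.rfind lower e.1.toList == M)
          = PySem.Chars.startswith (lower.drop M.toNat) e.1.toList := by
      intro e he
      rw [Bool.eq_iff_iff, beq_iff_eq, PySem.Chars.startswith_iff]
      constructor
      · intro hrf
        rw [rfind_eq_rlast] at hrf
        cases hcase : rlast lower e.1.toList lower.length with
        | none => rw [hcase] at hrf; simp at hrf; omega
        | some j =>
          rw [hcase] at hrf; simp at hrf
          obtain ⟨hj, hp, -⟩ := (rlast_eq_some_iff _ _ _ _).mp hcase
          have hMj : M.toNat = j := by omega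
          rw [hMj]; exact hp
      · intro hpref
        have hge := hrfind_ge M.toNat hMbound.1 e hpref
        have hle := rfind_le_foldl_max lower registry e he
        omega
    rw [find?_congr_mem registry _ _ hiff]
    -- B's sweep stops exactly at position M.toNat
    have hfindM : (registry.find? (fun e => PySem.Chars.startswith (lower.drop M.toNat) e.1.toList)).isSome := by
      rw [List.find?_isSome]
      exact ⟨e0, he0, by rw [PySem.Chars.startswith_iff]; exact hMbound.2⟩
    obtain ⟨ef, hef⟩ := Option.isSome_iff_exists.mp hfindM
    rw [hef]
    symm
    have := pyScanBGo_eq_some lower registry text.toList.length M.toNat ef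
      (by omega) hef
      (fun q hq hql => by
        rw [List.find?_eq_none]
        intro e he
        rw [PySem.Chars.startswith_iff]
        exact hnomatch_above q hq (by omega) e he)
    rw [this, Option.map_some]

-- ===== VERDICT (by name: the statement is the Claim_ definition above) =====
theorem find_last_mentioned_py_spec : Claim_equal_find_last_mentioned_py := by
  intro text registry hint _ _
  unfold Spec_find_last_mentioned_py find_last_mentioned_py find_last_mentioned_py_alt
  cases pyHintLookup registry hint with
  | some r => rfl
  | none => exact scan_eq text registry
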